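-- pv_equiv track=rewrite | github.com/aeebbr/Algorithm | 2024/04/prog_12938_최고의집합.py | solution
-- ===== SOURCE A (Python) =====
-- import heapq
--
-- def solution(n, s):
--     q = [(s//n)] * n
--     heapq.heapify(q)
--     total = sum(q)
--
--     # 매 턴의 최솟값에 1씩 증가
--     while True:
--         if total == s:
--             break
--         min = heapq.heappop(q)
--         heapq.heappush(q, min+1)
--         total += 1
--
--     q.sort()
--     if q[0] == 0:
--         return [-1]
--     else:
--         return q
-- ===== SOURCE B (Python) =====
-- def solution(n, s):
--     # closed form: each slot gets s//n, the remainder s%n slots get one extra;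
--     # built directly in sorted order.
--     q, r = divmod(s, n)
--     if q == 0:
--         return [-1]
--     return [q] * (n - r) + [q + 1] * r
-- ===== Notes on version B (the rewrite author's own statement) =====
-- stated objective: faster
-- what changed: replaces the heap simulation (heapify, then s%n pop-min/push-min+1 rounds, then a final sort) with the closed form divmod(s,n): n-r copies of s//n followed by r copies of s//n+1, built directly in sorted order
import Mathlib
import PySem

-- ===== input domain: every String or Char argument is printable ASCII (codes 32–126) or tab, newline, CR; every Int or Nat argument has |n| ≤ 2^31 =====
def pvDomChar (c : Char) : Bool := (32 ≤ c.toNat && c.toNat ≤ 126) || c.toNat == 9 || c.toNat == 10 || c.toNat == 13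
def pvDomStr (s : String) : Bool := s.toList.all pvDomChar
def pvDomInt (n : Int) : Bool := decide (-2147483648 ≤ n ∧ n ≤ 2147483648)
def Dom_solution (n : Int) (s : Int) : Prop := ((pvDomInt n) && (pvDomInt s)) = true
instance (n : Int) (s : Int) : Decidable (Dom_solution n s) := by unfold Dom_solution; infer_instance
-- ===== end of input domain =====

-- B replaces A's heap loop by the closed form divmod(s,n); equivalence proved for n > 0 (A raises otherwise).

-- ===== PORT A =====
-- heapq is modelled by its multiset contract with a counting dict (element → multiplicity):
-- heapify builds the counter, heappop removes and returns one copy of the minimum element,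
-- heappush adds one copy.  This is exact here: the heap's internal layout is unobservable,
-- since the program sorts q before reading any element of it.
def pvHeapify (xs : List Int) : PySem.Dict Int Int :=
  xs.foldl (fun d x => d.insert x (d.getD x 0 + 1)) PySem.Dict.empty

def pvHeappop (d : PySem.Dict Int Int) : Int × PySem.Dict Int Int :=
  match PySem.List.min? d.keys (fun x => x) with
  | none => (0, d)      -- heappop on an empty heap raises IndexError (outside Pre_)
  | some m =>
      let c := d.getD m 0
      (m, if c ≤ 1 then d.erase m else d.insert m (c - 1))

def pvHeappush (d : PySem.Dict Int Int) (v : Int) : PySem.Dict Int Int :=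
  d.insert v (d.getD v 0 + 1)

-- the while-loop; fuel = s - total, which decreases by 1 each turn (total == s exactly at fuel 0)
def pvLoop (s : Int) : Nat → PySem.Dict Int Int → Int → PySem.Dict Int Int
  | 0, d, _ => d
  | fuel+1, d, total =>
      if total = s then d
      else
        let p := pvHeappop d
        pvLoop s fuel (pvHeappush p.2 (p.1 + 1)) (total + 1)

-- q.sort(): the counter expanded in ascending key order (exact: the nondecreasing arrangement
-- of a multiset of ints is unique, the same list Python's sort returns)
def pvHeapSorted (d : PySem.Dict Int Int) : List Int :=
  (PySem.List.sorted d.items (fun p => p.1) false).flatMap (fun p => List.replicate p.2.toNat p.1)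

def solution (n : Int) (s : Int) : List Int :=
  let q := pvHeapify (List.replicate n.toNat (PySem.Int.floordiv s n))
  let total := (q.items.map (fun p => p.1 * p.2)).sum    -- total = sum(q)
  let q2 := pvLoop s (s - total).toNat q total
  let qs := pvHeapSorted q2
  if PySem.List.pyGetD qs 0 0 = 0 then [-1] else qs

-- ===== PORT B =====
def solution_alt (n : Int) (s : Int) : List Int :=
  match PySem.Int.divmod? s n with
  | none => []          -- ZeroDivisionError (outside Pre_)
  | some qr =>
      if qr.1 = 0 then [-1]
      else List.replicate (n - qr.2).toNat qr.1 ++ List.replicate qr.2.toNat (qr.1 + 1)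

-- ===== PRECONDITION & SPEC =====
-- Pre_ excludes exactly n ≤ 0: there A raises (ZeroDivisionError for n = 0; IndexError on the
-- empty heap/list for n < 0) or loops forever, never returning a value.
def Pre_solution (n : Int) (s : Int) : Prop := 0 < n
instance (n : Int) (s : Int) : Decidable (Pre_solution n s) := by unfold Pre_solution; infer_instance
def pvWitness_solution : Int × Int := (3, 7)

def Spec_solution (n : Int) (s : Int) (out : List Int) : Prop := out = solution_alt n s
instance (n : Int) (s : Int) (out : List Int) : Decidable (Spec_solution n s out) := by unfold Spec_solution; infer_instance

-- ===== CLAIM (what is proved, stated in full; the proofs are below) =====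
def Claim_equal_solution : Prop := ∀ (n : Int) (s : Int), Dom_solution n s → Pre_solution n s → Spec_solution n s (solution n s)

-- ===== LEMMAS AND PROOFS =====

theorem heapify_go (qv c : Int) : ∀ (m : Nat),
    (List.replicate m qv).foldl (fun d x => d.insert x (d.getD x 0 + 1)) (PySem.Dict.mk [(qv, c)])
      = PySem.Dict.mk [(qv, c + m)] := by
  intro m
  induction m generalizing c with
  | zero => simp
  | succ m ih =>
      rw [List.replicate_succ, List.foldl_cons]
      have h1 : (PySem.Dict.mk [(qv, c)]).insert qv ((PySem.Dict.mk [(qv, c)]).getD qv 0 + 1)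
          = PySem.Dict.mk [(qv, c + 1)] := by
        apply PySem.Dict.ext
        simp [PySem.Dict.items_insert, PySem.Dict.getD_eq_get?_getD, PySem.Dict.get?_mk_cons]
      rw [h1, ih (c + 1), show c + 1 + (m : Int) = c + ((m + 1 : Nat) : Int) from by push_cast; ring]

theorem heapify_rep (qv : Int) (m : Nat) (hm : 0 < m) :
    pvHeapify (List.replicate m qv) = PySem.Dict.mk [(qv, (m : Int))] := by
  obtain ⟨m', rfl⟩ : ∃ m', m = m' + 1 := ⟨m - 1, by omega⟩
  unfold pvHeapify
  rw [List.replicate_succ, List.foldl_cons]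
  have h0 : PySem.Dict.empty.insert qv (PySem.Dict.empty.getD qv (0 : Int) + 1)
      = PySem.Dict.mk [(qv, (1 : Int))] := by
    apply PySem.Dict.ext
    simp [PySem.Dict.items_insert, PySem.Dict.getD_eq_get?_getD, PySem.Dict.get?, PySem.Dict.empty]
  rw [h0, heapify_go, show (1 : Int) + (m' : Int) = ((m' + 1 : Nat) : Int) from by push_cast; ring]

theorem pop_D1 (qv a : Int) (ha : 2 ≤ a) :
    pvHeappop (PySem.Dict.mk [(qv, a)]) = (qv, PySem.Dict.mk [(qv, a - 1)]) := by
  unfold pvHeappop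
  have hk : (PySem.Dict.mk [(qv, a)]).keys = [qv] := by simp
  rw [hk, PySem.List.min?_id_cons]
  have hg : (PySem.Dict.mk [(qv, a)]).getD qv 0 = a := by
    simp [PySem.Dict.getD_eq_get?_getD, PySem.Dict.get?_mk_cons]
  simp only [List.foldl_nil, hg]
  rw [if_neg (by omega)]
  have : (PySem.Dict.mk [(qv, a)]).insert qv (a - 1) = PySem.Dict.mk [(qv, a - 1)] := by
    apply PySem.Dict.ext
    simp [PySem.Dict.items_insert]
  rw [this]

theorem min2 (qv : Int) : PySem.List.min? [qv, qv + 1] (fun x => x) = some qv := by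
  rw [PySem.List.min?_id_cons]; simp

theorem pop_D2 (qv a k : Int) (ha : 2 ≤ a) :
    pvHeappop (PySem.Dict.mk [(qv, a), (qv + 1, k)])
      = (qv, PySem.Dict.mk [(qv, a - 1), (qv + 1, k)]) := by
  unfold pvHeappop
  have hk : (PySem.Dict.mk [(qv, a), (qv + 1, k)]).keys = [qv, qv + 1] := by simp
  rw [hk, min2]
  have hg : (PySem.Dict.mk [(qv, a), (qv + 1, k)]).getD qv 0 = a := by
    simp [PySem.Dict.getD_eq_get?_getD, PySem.Dict.get?_mk_cons]
  simp only [hg]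
  rw [if_neg (by omega)]
  have : (PySem.Dict.mk [(qv, a), (qv + 1, k)]).insert qv (a - 1)
      = PySem.Dict.mk [(qv, a - 1), (qv + 1, k)] := by
    apply PySem.Dict.ext
    simp [PySem.Dict.items_insert]
  rw [this]

theorem push_D1 (qv a : Int) :
    pvHeappush (PySem.Dict.mk [(qv, a)]) (qv + 1) = PySem.Dict.mk [(qv, a), (qv + 1, 1)] := by
  unfold pvHeappush
  have hg : (PySem.Dict.mk [(qv, a)]).getD (qv + 1) 0 = 0 := by
    simp [PySem.Dict.getD_eq_get?_getD, PySem.Dict.get?_mk_cons, PySem.Dict.get?_empty,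
      show PySem.Dict.mk ([] : List (Int × Int)) = PySem.Dict.empty from rfl,
      show ¬ qv = qv + 1 from by omega]
  rw [hg]
  apply PySem.Dict.ext
  rw [PySem.Dict.items_insert]
  simp [show ¬ qv = qv + 1 from by omega]

theorem push_D2 (qv a k : Int) :
    pvHeappush (PySem.Dict.mk [(qv, a), (qv + 1, k)]) (qv + 1)
      = PySem.Dict.mk [(qv, a), (qv + 1, k + 1)] := by
  unfold pvHeappush
  have hg : (PySem.Dict.mk [(qv, a), (qv + 1, k)]).getD (qv + 1) 0 = k := by
    simp [PySem.Dict.getD_eq_get?_getD, PySem.Dict.get?_mk_cons, show ¬ qv = qv + 1 from by omega]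
  rw [hg]
  apply PySem.Dict.ext
  rw [PySem.Dict.items_insert]
  simp [show ¬ qv = qv + 1 from by omega]

theorem pvLoop_inv (s qv : Int) : ∀ (j : Nat) (a k : Int), (j : Int) < a →
    pvLoop s j (PySem.Dict.mk [(qv, a), (qv + 1, k)]) (s - j)
      = PySem.Dict.mk [(qv, a - j), (qv + 1, k + j)] := by
  intro j
  induction j with
  | zero => intro a k _; simp [pvLoop]
  | succ j ih =>
      intro a k hja
      have hcast : ((j + 1 : Nat) : Int) = (j : Int) + 1 := by push_cast; ring
      simp only [pvLoop]
      rw [if_neg (by omega : ¬ s - ((j : Nat) + 1 : Nat) = s)]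
      rw [show ((((j : Nat) + 1 : Nat)) : Int) = (j : Int) + 1 from by push_cast; ring] at hja ⊢
      rw [pop_D2 qv a k (by omega)]
      simp only
      rw [push_D2 qv (a - 1) k,
        show s - ((j : Int) + 1) + 1 = s - j from by ring,
        ih (a - 1) (k + 1) (by omega),
        show a - 1 - (j : Int) = a - ((j : Int) + 1) from by ring,
        show k + 1 + (j : Int) = k + ((j : Int) + 1) from by ring]

theorem sorted_single (p : Int × Int) :
    PySem.List.sorted [p] (fun q => q.1) false = [p] := by
  apply PySem.List.sorted_eq_self_of_pairwise
  simp

theorem sorted_two (qv a k : Int) :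
    PySem.List.sorted [(qv, a), (qv + 1, k)] (fun q => q.1) false = [(qv, a), (qv + 1, k)] := by
  apply PySem.List.sorted_eq_self_of_pairwise
  simp

theorem solution_eq (n s : Int) (hn : 0 < n) : solution n s = solution_alt n s := by
  set qv := PySem.Int.floordiv s n with hqv
  have hmod : qv * n + PySem.Int.mod s n = s := PySem.Int.floordiv_mul_add_mod s n
  set r := PySem.Int.mod s n with hr
  have hr0 : 0 ≤ r := PySem.Int.mod_nonneg s hn
  have hrn : r < n := PySem.Int.mod_lt s hn
  have hdm : PySem.Int.divmod? s n = some (qv, r) := by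
    unfold PySem.Int.divmod?
    rw [if_neg (by omega : ¬ n = 0)]
    rfl
  have hrep : pvHeapify (List.replicate n.toNat qv) = PySem.Dict.mk [(qv, n)] := by
    rw [heapify_rep qv n.toNat (by omega), Int.toNat_of_nonneg hn.le]
  have hsum : ((PySem.Dict.mk [(qv, n)]).items.map (fun p => p.1 * p.2)).sum = s - r := by
    simp
    omega
  have hfuel : (s - (s - r)).toNat = r.toNat := by omega
  have hnr : (n - r).toNat = n.toNat - r.toNat := by omega
  simp only [solution, solution_alt, ← hqv, hrep, hsum, hfuel, hdm]
  rcases eq_or_lt_of_le hr0 with hr1 | hr1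
  · -- r = 0: the loop runs zero turns
    rw [show r.toNat = 0 from by omega, pvLoop]
    unfold pvHeapSorted
    rw [sorted_single]
    have hn1 : ∃ p, n.toNat = p + 1 := ⟨n.toNat - 1, by omega⟩
    obtain ⟨p, hp⟩ := hn1
    simp only [List.flatMap_cons, List.flatMap_nil, List.append_nil, hnr,
      show r.toNat = 0 from by omega, Nat.sub_zero, List.replicate_zero, List.append_nil, hp,
      List.replicate_succ, PySem.List.pyGetD_zero_cons]
  · -- r ≥ 1: one explicit first turn from {qv: n}, then the invariant on {qv: _, qv+1: _}
    have hft : r.toNat = (r - 1).toNat + 1 := by omega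
    rw [hft]
    simp only [pvLoop]
    rw [if_neg (by omega : ¬ s - r = s), pop_D1 qv n (by omega)]
    simp only
    rw [push_D1 qv (n - 1)]
    have hstep := pvLoop_inv s qv (r - 1).toNat (n - 1) 1 (by omega)
    rw [show s - (((r - 1).toNat : Nat) : Int) = s - r + 1 from by omega] at hstep
    rw [hstep,
      show n - 1 - (((r - 1).toNat : Nat) : Int) = n - r from by omega,
      show 1 + (((r - 1).toNat : Nat) : Int) = r from by omega]
    unfold pvHeapSorted
    rw [sorted_two]
    obtain ⟨p, hp⟩ : ∃ p, (n - r).toNat = p + 1 := ⟨(n - r).toNat - 1, by omega⟩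
    simp only [List.flatMap_cons, List.flatMap_nil, List.append_nil, hp, hft,
      List.replicate_succ, List.cons_append, PySem.List.pyGetD_zero_cons]

-- ===== VERDICT (by name: the statement is the Claim_ definition above) =====
theorem solution_spec : Claim_equal_solution := by
  intro n s _ hpre
  exact solution_eq n s hpre
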